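-- pv_equiv track=rewrite | github.com/manwar/perlweeklychallenge-club | challenge-371/lubos-kolouch/python/ch-2.py | find_equilibrium_subsets
-- ===== SOURCE A (Python) =====
-- def find_equilibrium_subsets(ints: list[int]) -> list[list[int]]:
--     """Return all equilibrium subsets from the given array."""
--     n = len(ints)
--     results = []
--
--     # Iterate through all non-empty subsets using bitmask
--     for mask in range(1, 1 << n):
--         sum_vals = 0
--         sum_inds = 0
--         subset = []
--
--         for i in range(n):
--             if mask & (1 << i):
--                 sum_vals += ints[i]
--                 sum_inds += i + 1
--                 subset.append(ints[i])
--
--         if sum_vals == sum_inds: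
--             results.append(subset)
--
--     return results
-- ===== SOURCE B (Python) =====
-- def find_equilibrium_subsets(ints: list[int]) -> list[list[int]]:
--     """Return all equilibrium subsets from the given array."""
--     # Build the powerset by iterative doubling, tracking (subset, value-sum,
--     # 1-based index-sum) for each subset; then keep the non-empty ones whose
--     # two sums agree.
--     states = [([], 0, 0)]
--     for idx, x in enumerate(ints):
--         states = states + [(sub + [x], sv + x, si + idx + 1)
--                            for (sub, sv, si) in states]
--     return [sub for (sub, sv, si) in states[1:] if sv == si]
-- ===== Notes on version B (the rewrite author's own statement) =====
-- stated objective: alternative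
-- what changed: B replaces A's bitmask enumeration (recomputing each subset from scratch with an inner index loop per mask) by an iterative powerset-doubling that carries each subset together with its running value-sum and 1-based index-sum, then filters the built list once, skipping the empty subset.
import Mathlib
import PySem

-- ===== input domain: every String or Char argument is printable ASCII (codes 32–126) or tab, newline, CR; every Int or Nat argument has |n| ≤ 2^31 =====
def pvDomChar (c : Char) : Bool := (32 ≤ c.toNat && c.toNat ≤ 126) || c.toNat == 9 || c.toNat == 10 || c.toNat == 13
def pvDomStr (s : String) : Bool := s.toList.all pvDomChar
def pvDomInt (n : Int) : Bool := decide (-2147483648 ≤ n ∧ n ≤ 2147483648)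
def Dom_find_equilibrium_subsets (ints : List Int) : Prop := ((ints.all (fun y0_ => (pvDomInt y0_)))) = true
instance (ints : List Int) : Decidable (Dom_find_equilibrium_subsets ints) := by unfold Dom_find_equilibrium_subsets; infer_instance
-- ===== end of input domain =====

-- B replaces A's bitmask enumeration by an iterative powerset-doubling that carries each
-- subset's value-sum and index-sum along, then filters once (objective: alternative).

-- ===== PORT A =====
-- '1 << i' is ported as '<<<' with i.toNat (i runs over range(n), so i ≥ 0);
-- ints[i] is in range for every i in range(n), so it is pyGetD (exact there).
def find_equilibrium_subsets (ints : List Int) : List (List Int) :=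
  let n := ints.length
  (PySem.List.pyRange 1 ((1 : Int) <<< n)).foldl
    (fun results mask =>
      let st : Int × Int × List Int :=
        (PySem.List.pyRange 0 (n : Int)).foldl
          (fun st i =>
            if PySem.Int.band mask ((1 : Int) <<< i.toNat) ≠ 0 then
              (st.1 + PySem.List.pyGetD ints i 0, st.2.1 + i + 1,
                st.2.2 ++ [PySem.List.pyGetD ints i 0])
            else st)
          (0, 0, [])
      if st.1 = st.2.1 then results ++ [st.2.2] else results)
    []

-- ===== PORT B =====
def find_equilibrium_subsets_alt (ints : List Int) : List (List Int) :=
  let states :=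
    (PySem.List.enumerate ints).foldl
      (fun (states : List (List Int × Int × Int)) p =>
        states ++ states.map (fun s => (s.1 ++ [p.2], s.2.1 + p.2, s.2.2 + p.1 + 1)))
      [([], 0, 0)]
  ((states.drop 1).filter (fun s => s.2.1 == s.2.2)).map (fun s => s.1)

-- ===== PRECONDITION & SPEC =====
def Spec_find_equilibrium_subsets (ints : List Int) (out : List (List Int)) : Prop := out = find_equilibrium_subsets_alt ints
instance (ints : List Int) (out : List (List Int)) : Decidable (Spec_find_equilibrium_subsets ints out) := by unfold Spec_find_equilibrium_subsets; infer_instance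

-- ===== CLAIM (what is proved, stated in full; the proofs are below) =====
def Claim_equal_find_equilibrium_subsets : Prop := ∀ (ints : List Int), Dom_find_equilibrium_subsets ints → Spec_find_equilibrium_subsets ints (find_equilibrium_subsets ints)

-- ===== LEMMAS AND PROOFS =====

-- A's inner loop (the triple (sum_vals, sum_inds, subset) computed from a mask), by name.
def pvTrip (ints : List Int) (mask : Int) : Int × Int × List Int :=
  (PySem.List.pyRange 0 (ints.length : Int)).foldl
    (fun st i =>
      if PySem.Int.band mask ((1 : Int) <<< i.toNat) ≠ 0 then
        (st.1 + PySem.List.pyGetD ints i 0, st.2.1 + i + 1,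
          st.2.2 ++ [PySem.List.pyGetD ints i 0])
      else st)
    (0, 0, [])

-- The same triple over Nat masks and Nat indices.
def pvTripN (ints : List Int) (m : Nat) : Int × Int × List Int :=
  (List.range ints.length).foldl
    (fun st i =>
      if m.testBit i then
        (st.1 + ints.getD i 0, st.2.1 + (i : Int) + 1, st.2.2 ++ [ints.getD i 0])
      else st)
    (0, 0, [])

-- B's doubling loop, by name.
def pvStates (ints : List Int) : List (List Int × Int × Int) :=
  (PySem.List.enumerate ints).foldl
    (fun (states : List (List Int × Int × Int)) p =>
      states ++ states.map (fun s => (s.1 ++ [p.2], s.2.1 + p.2, s.2.2 + p.1 + 1)))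
    [([], 0, 0)]

def pvConv (t : Int × Int × List Int) : List Int × Int × Int := (t.2.2, t.1, t.2.1)

lemma pv_shl_one (k : Nat) : ((1 : Int) <<< k) = ((2 ^ k : Nat) : Int) := by
  simp [Int.shiftLeft_eq]

lemma pv_decide_beq (a b : Int) : (decide (a = b)) = (a == b) := by
  rcases Decidable.em (a = b) with h | h <;> simp [h]

lemma pvTrip_eq (ints : List Int) (m : Nat) : pvTrip ints (m : Int) = pvTripN ints m := by
  unfold pvTrip pvTripN
  rw [PySem.List.pyRange_zero_natCast, List.foldl_map]
  apply PySem.List.foldl_congr_mem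
  intro acc i _
  rw [Int.toNat_natCast, Int.one_shiftLeft, PySem.Int.band_natCast, Nat.and_two_pow]
  rcases h : m.testBit i
  · simp
  · simp [PySem.List.pyGetD_natCast]

lemma pvTripN_append_low (l : List Int) (x : Int) (m : Nat) (h : m < 2 ^ l.length) :
    pvTripN (l ++ [x]) m = pvTripN l m := by
  unfold pvTripN
  simp only [List.length_append, List.length_cons, List.length_nil,
    List.range_succ, List.foldl_append, List.foldl_cons, List.foldl_nil]
  rw [Nat.testBit_lt_two_pow h]
  simp only [Bool.false_eq_true, if_false]
  apply PySem.List.foldl_congr_mem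
  intro acc i hi
  rw [List.mem_range] at hi
  rw [List.getD_append l [x] 0 i hi]

lemma pvTripN_append_high (l : List Int) (x : Int) (m : Nat) (h : m < 2 ^ l.length) :
    pvTripN (l ++ [x]) (2 ^ l.length + m) =
      ((pvTripN l m).1 + x, (pvTripN l m).2.1 + (l.length : Int) + 1,
        (pvTripN l m).2.2 ++ [x]) := by
  unfold pvTripN
  simp only [List.length_append, List.length_cons, List.length_nil,
    List.range_succ, List.foldl_append, List.foldl_cons, List.foldl_nil]
  rw [Nat.testBit_two_pow_add_eq, Nat.testBit_lt_two_pow h]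
  have hcong :
      (List.range l.length).foldl
        (fun st i =>
          if (2 ^ l.length + m).testBit i then
            (st.1 + (l ++ [x]).getD i 0, st.2.1 + (i : Int) + 1,
              st.2.2 ++ [(l ++ [x]).getD i 0])
          else st) ((0 : Int), (0 : Int), ([] : List Int)) =
      (List.range l.length).foldl
        (fun st i =>
          if m.testBit i then
            (st.1 + l.getD i 0, st.2.1 + (i : Int) + 1, st.2.2 ++ [l.getD i 0])
          else st) ((0 : Int), (0 : Int), ([] : List Int)) := by
    apply PySem.List.foldl_congr_mem
    intro acc i hi
    rw [List.mem_range] at hi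
    rw [Nat.testBit_two_pow_add_gt hi, List.getD_append l [x] 0 i hi]
  rw [hcong]
  simp

lemma pv_enumerate_append (l : List Int) (x : Int) (s : Int) :
    PySem.List.enumerate (l ++ [x]) s = PySem.List.enumerate l s ++ [(s + l.length, x)] := by
  induction l generalizing s with
  | nil => simp [PySem.List.enumerate]
  | cons y t ih =>
      simp only [List.cons_append, PySem.List.enumerate, ih, List.cons_append]
      have : s + 1 + (t.length : Int) = s + ((t.length : Int) + 1) := by ring
      simp [this]

lemma pvStates_eq (ints : List Int) :
    pvStates ints = (List.range (2 ^ ints.length)).map (fun m => pvConv (pvTripN ints m)) := by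
  induction ints using List.reverseRecOn with
  | nil => decide
  | append_singleton l x ih =>
      have hlen : (l ++ [x]).length = l.length + 1 := by simp
      unfold pvStates
      rw [pv_enumerate_append, List.foldl_append]
      have hfold : pvStates l =
          (PySem.List.enumerate l).foldl
            (fun (states : List (List Int × Int × Int)) p =>
              states ++ states.map (fun s => (s.1 ++ [p.2], s.2.1 + p.2, s.2.2 + p.1 + 1)))
            [([], 0, 0)] := rfl
      rw [← hfold, ih]
      simp only [List.foldl_cons, List.foldl_nil]
      rw [hlen, pow_succ, mul_two, List.range_add, List.map_append]
      congr 1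
      · refine (List.map_congr_left ?_).symm
        intro m hm
        rw [List.mem_range] at hm
        rw [pvTripN_append_low l x m hm]
      · rw [List.map_map, List.map_map]
        refine List.map_congr_left ?_
        intro m hm
        rw [List.mem_range] at hm
        simp [Function.comp, pvTripN_append_high l x m hm, pvConv]

lemma pvA_eq (ints : List Int) :
    find_equilibrium_subsets ints =
      ((PySem.List.pyRange 1 ((1 : Int) <<< ints.length)).filter
          (fun mask => decide ((pvTrip ints mask).1 = (pvTrip ints mask).2.1))).map
        (fun mask => (pvTrip ints mask).2.2) := by
  show (PySem.List.pyRange 1 ((1 : Int) <<< ints.length)).foldl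
      (fun results mask =>
        if (pvTrip ints mask).1 = (pvTrip ints mask).2.1 then
          results ++ [(pvTrip ints mask).2.2]
        else results) [] = _
  rw [PySem.List.foldl_append_ite (p := fun mask => (pvTrip ints mask).1 = (pvTrip ints mask).2.1)
    (f := fun mask => (pvTrip ints mask).2.2)]
  simp

lemma pv_pyRange_from_one (k : Nat) (hk : 0 < k) :
    PySem.List.pyRange 1 ((k : Nat) : Int) =
      ((List.range k).map (fun m : Nat => (m : Int))).drop 1 := by
  rw [← PySem.List.pyRange_zero_natCast,
    PySem.List.pyRange_one_cons (a := 0) (b := (k : Int)) (by exact_mod_cast hk)]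
  norm_num

-- ===== VERDICT (by name: the statement is the Claim_ definition above) =====
theorem find_equilibrium_subsets_spec : Claim_equal_find_equilibrium_subsets := by
  intro ints _
  unfold Spec_find_equilibrium_subsets
  have hB : find_equilibrium_subsets_alt ints =
      (((pvStates ints).drop 1).filter (fun s => s.2.1 == s.2.2)).map (fun s => s.1) := rfl
  rw [pvA_eq, hB, pvStates_eq, pv_shl_one,
    pv_pyRange_from_one (2 ^ ints.length) (Nat.two_pow_pos _), ← List.map_drop, ← List.map_drop,
    List.filter_map, List.filter_map, List.map_map, List.map_map]
  have hp : ∀ m ∈ (List.range (2 ^ ints.length)).drop 1,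
      ((fun mask => decide ((pvTrip ints mask).1 = (pvTrip ints mask).2.1)) ∘
          (fun m : Nat => (m : Int))) m
        = ((fun s : List Int × Int × Int => s.2.1 == s.2.2) ∘
          (fun m => pvConv (pvTripN ints m))) m := by
    intro m _
    simp [Function.comp, pvTrip_eq, pvConv, pv_decide_beq]
  rw [List.filter_congr hp]
  refine List.map_congr_left ?_
  intro m hm
  simp [Function.comp, pvTrip_eq, pvConv]
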